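-- pv_equiv track=rewrite | github.com/Schneefelsen/Sem2_FortProg | util.py | binary_search_tree
-- ===== SOURCE A (Python) =====
-- def binary_search_tree(problem, target):
--     class TreeNode:
--         def __init__(self, key, index):
--             self.left = None
--             self.right = None
--             self.value = key
--             self.index = index
--     def insert(root, key, index):
--         if root is None:
--             return TreeNode(key, index)
--         else:
--             if root.value < key:
--                 root.right = insert(root.right, key, index)
--             else:
--                 root.left = insert(root.left, key, index)
--         return root
--     def search_bst_node(root, target):
--         if root is None:
--             return -1
--         if root.value == target:
--             return root.index
--         elif root.value < target:
--             return search_bst_node(root.right, target)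
--         else:
--             return search_bst_node(root.left, target)
--     root = None
--     for i, value in enumerate(problem):
--         root = insert(root, value, i)
--     return search_bst_node(root, target)
-- ===== SOURCE B (Python) =====
-- def binary_search_tree(problem, target):
--     # One left-to-right scan: the BST in A (duplicates inserted left) always
--     # yields the first index of target, so no tree is needed.
--     for i, value in enumerate(problem):
--         if value == target:
--             return i
--     return -1
-- ===== Notes on version B (the rewrite author's own statement) =====
-- stated objective: faster
-- what changed: Replaces building a binary search tree (recursive insert per element, then recursive search) with a single left-to-right scan returning the first index equal to target, which is provably the value the BST search returns.
import Mathlib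
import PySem

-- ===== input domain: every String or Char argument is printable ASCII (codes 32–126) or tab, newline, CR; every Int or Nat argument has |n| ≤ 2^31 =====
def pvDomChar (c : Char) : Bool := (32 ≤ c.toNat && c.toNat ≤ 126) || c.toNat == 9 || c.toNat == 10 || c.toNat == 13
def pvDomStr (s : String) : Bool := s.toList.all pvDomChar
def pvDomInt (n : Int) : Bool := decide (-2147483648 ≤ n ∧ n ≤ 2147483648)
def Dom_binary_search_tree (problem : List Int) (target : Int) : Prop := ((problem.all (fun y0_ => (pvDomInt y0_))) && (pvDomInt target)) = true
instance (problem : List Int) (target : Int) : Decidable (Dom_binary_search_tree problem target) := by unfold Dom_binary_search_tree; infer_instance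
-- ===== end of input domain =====

-- B replaces A's binary-search-tree build + search with a single linear scan
-- for the first index equal to target (objective: faster, one pass, no tree).

-- ===== PORT A =====
-- TreeNode: value, index, left/right children (None = nil)
inductive PvTree : Type
  | nil : PvTree
  | node : PvTree → Int → Int → PvTree → PvTree   -- left, value, index, right
deriving DecidableEq, Repr

-- insert(root, key, index)
def pvInsert (root : PvTree) (key : Int) (index : Int) : PvTree :=
  match root with
  | .nil => .node .nil key index .nil
  | .node l v i r =>
    if v < key then .node l v i (pvInsert r key index)
    else .node (pvInsert l key index) v i r

-- search_bst_node(root, target)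
def pvSearch (root : PvTree) (target : Int) : Int :=
  match root with
  | .nil => -1
  | .node l v i r =>
    if v == target then i
    else if v < target then pvSearch r target
    else pvSearch l target

def binary_search_tree (problem : List Int) (target : Int) : Int :=
  -- root = None; for i, value in enumerate(problem): root = insert(root, value, i)
  let root := (PySem.List.enumerate problem).foldl (fun r p => pvInsert r p.2 p.1) PvTree.nil
  pvSearch root target

-- ===== PORT B =====
-- for i, value in enumerate(problem): if value == target: return i / return -1
def pvScan (xs : List Int) (target : Int) (i : Int) : Int :=
  match xs with
  | [] => -1
  | x :: rest => if x == target then i else pvScan rest target (i + 1)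

def binary_search_tree_alt (problem : List Int) (target : Int) : Int :=
  pvScan problem target 0

-- ===== PRECONDITION & SPEC =====
def Spec_binary_search_tree (problem : List Int) (target : Int) (out : Int) : Prop := out = binary_search_tree_alt problem target
instance (problem : List Int) (target : Int) (out : Int) : Decidable (Spec_binary_search_tree problem target out) := by unfold Spec_binary_search_tree; infer_instance

-- ===== CLAIM (what is proved, stated in full; the proofs are below) =====
def Claim_equal_binary_search_tree : Prop := ∀ (problem : List Int) (target : Int), Dom_binary_search_tree problem target → Spec_binary_search_tree problem target (binary_search_tree problem target)

-- ===== LEMMAS AND PROOFS =====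

-- all indices stored in the tree are nonnegative
def pvNonneg : PvTree → Prop
  | .nil => True
  | .node l _ i r => 0 ≤ i ∧ pvNonneg l ∧ pvNonneg r

theorem pvNonneg_insert (t : PvTree) (k i : Int) (ht : pvNonneg t) (hi : 0 ≤ i) :
    pvNonneg (pvInsert t k i) := by
  induction t with
  | nil => exact ⟨hi, trivial, trivial⟩
  | node l v j r ihl ihr =>
    obtain ⟨hj, hl, hr⟩ := ht
    simp only [pvInsert]
    split <;> exact ⟨hj, by first | exact ⟨ihl hl, hr⟩ | exact ⟨hl, ihr hr⟩⟩

-- inserting (k, i): the search result changes only when the target was absent and k = target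
theorem pvSearch_insert (t : PvTree) (k i target : Int) (ht : pvNonneg t) (hi : 0 ≤ i) :
    pvSearch (pvInsert t k i) target =
      if pvSearch t target = -1 then (if k = target then i else -1)
      else pvSearch t target := by
  induction t with
  | nil =>
    simp only [pvInsert, pvSearch, if_pos rfl, beq_iff_eq]
    split <;> simp_all
  | node l v j r ihl ihr =>
    obtain ⟨hj, hl, hr⟩ := ht
    simp only [pvInsert]
    by_cases hvk : v < k
    · simp only [if_pos hvk, pvSearch, beq_iff_eq]
      by_cases hvt : v = target
      · simp only [if_pos hvt]
        have : ¬ (j = -1) := by omega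
        simp [this]
      · simp only [if_neg hvt]
        by_cases hlt : v < target
        · simp [hlt, ihr hr]
        · -- go left; note k = target is impossible: target < v < k
          have hk : ¬ (k = target) := by omega
          simp [hlt, hk]
    · simp only [if_neg hvk, pvSearch, beq_iff_eq]
      by_cases hvt : v = target
      · simp only [if_pos hvt]
        have : ¬ (j = -1) := by omega
        simp [this]
      · simp only [if_neg hvt]
        by_cases hlt : v < target
        · -- go right; k = target impossible: k ≤ v < target
          have hk : ¬ (k = target) := by omega
          simp [hlt, hk]
        · simp [hlt, ihl hl]

-- first index recorded in a pair list, B-side scan on enumerated pairs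
def pvFindPair (ps : List (Int × Int)) (target : Int) : Int :=
  match ps with
  | [] => -1
  | p :: rest => if p.2 = target then p.1 else pvFindPair rest target

theorem pvFold_search (ps : List (Int × Int)) (t : PvTree) (target : Int)
    (ht : pvNonneg t) (hps : ∀ p ∈ ps, 0 ≤ p.1) :
    pvSearch (ps.foldl (fun r p => pvInsert r p.2 p.1) t) target =
      if pvSearch t target = -1 then pvFindPair ps target else pvSearch t target := by
  induction ps generalizing t with
  | nil => simp [pvFindPair]
  | cons p rest ih =>
    have hp : 0 ≤ p.1 := hps p (by simp)
    have hrest : ∀ q ∈ rest, 0 ≤ q.1 := fun q hq => hps q (by simp [hq])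
    simp only [List.foldl_cons]
    rw [ih (pvInsert t p.2 p.1) (pvNonneg_insert t p.2 p.1 ht hp) hrest,
        pvSearch_insert t p.2 p.1 target ht hp]
    simp only [pvFindPair]
    by_cases h0 : pvSearch t target = -1
    · by_cases h1 : p.2 = target
      · simp [h0, h1]; omega
      · simp [h0, h1]
    · simp [h0]

theorem pvFindPair_enumerate (xs : List Int) (target : Int) (s : Int) :
    pvFindPair (PySem.List.enumerate xs s) target = pvScan xs target s := by
  induction xs generalizing s with
  | nil => simp [PySem.List.enumerate_nil, pvFindPair, pvScan]
  | cons x rest ih =>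
    simp only [PySem.List.enumerate_cons, pvFindPair, pvScan, beq_iff_eq]
    split
    · rfl
    · exact ih (s + 1)

-- ===== VERDICT (by name: the statement is the Claim_ definition above) =====
theorem binary_search_tree_spec : Claim_equal_binary_search_tree := by
  intro problem target _
  show pvSearch ((PySem.List.enumerate problem).foldl (fun r p => pvInsert r p.2 p.1) PvTree.nil)
        target = binary_search_tree_alt problem target
  rw [pvFold_search _ _ _ (by simp [pvNonneg]) (by
    intro p hp
    rw [PySem.List.mem_enumerate_iff] at hp
    obtain ⟨k, hk, rfl⟩ := hp
    simp)]
  simpa [pvSearch, binary_search_tree_alt] using pvFindPair_enumerate problem target 0
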